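-- pv_equiv track=rewrite | github.com/RoyBSimons/Locksmith | scripts/specificity_check.py | generate_possible_sequences
-- ===== SOURCE A (Python) =====
-- def generate_possible_sequences(sequence, index, sequences):
--     # Base case: If we have processed the entire sequence, add it to the list
--     if index == len(sequence):
--         return [''.join(sequence)]
--     sequences = []
--     # Create a copy of the sequence to handle the 'R' replacement
--     sequence_copy = sequence.copy()
--
--     if sequence[index] == 'R':
--     # Replace 'R' with 'G' and continue generating sequences
--         sequence[index] = 'G'
--         sequences.extend(generate_possible_sequences(sequence, index + 1, sequences))
--     # Replace 'R' with 'A' and continue generating sequences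
--         sequence_copy[index] = 'A'
--         sequences.extend(generate_possible_sequences(sequence_copy, index + 1, sequences))
--     else:
--         sequences.extend(generate_possible_sequences(sequence, index + 1, sequences))
--     return sequences
-- ===== SOURCE B (Python) =====
-- # Iterative breadth-first expansion: one pass over the tail, keeping all partial
-- # strings in an accumulator (A recurses and mutates its argument in place; B is
-- # pure and agrees on the RETURN value only).
-- def generate_possible_sequences(sequence, index, sequences):
--     acc = [''.join(sequence[:index])]
--     for ch in sequence[index:]:
--         if ch == 'R':
--             acc = [p + c for p in acc for c in ('G', 'A')]
--         else:
--             acc = [p + ch for p in acc]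
--     return acc
-- ===== Notes on version B (the rewrite author's own statement) =====
-- stated objective: simpler
-- what changed: Replaces A's branching recursion with in-place mutation and a list copy per 'R' by a single iterative left-to-right pass that keeps all partial strings in an accumulator (breadth-first product expansion); return-value equivalence only, since A mutates its argument and B does not.
-- outside the precondition, e.g. on generate_possible_sequences(['R', 'G'], -1, []): A returns ['GG', 'AG'], B returns ['RG']; on generate_possible_sequences(['R'], 2, []): A raises IndexError, B returns ['R']
import Mathlib
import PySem

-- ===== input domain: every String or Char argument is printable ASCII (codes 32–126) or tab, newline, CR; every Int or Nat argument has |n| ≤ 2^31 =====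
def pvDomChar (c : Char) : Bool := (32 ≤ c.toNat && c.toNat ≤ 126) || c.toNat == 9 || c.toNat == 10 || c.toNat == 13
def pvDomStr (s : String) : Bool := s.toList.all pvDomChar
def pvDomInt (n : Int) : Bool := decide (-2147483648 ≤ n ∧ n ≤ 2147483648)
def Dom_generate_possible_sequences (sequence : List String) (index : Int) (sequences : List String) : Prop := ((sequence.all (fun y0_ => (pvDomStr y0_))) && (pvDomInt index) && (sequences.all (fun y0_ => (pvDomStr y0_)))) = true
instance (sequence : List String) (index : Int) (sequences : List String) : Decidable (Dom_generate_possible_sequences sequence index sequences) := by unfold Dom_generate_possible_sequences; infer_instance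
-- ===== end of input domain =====

-- B replaces A's branching recursion (which mutates its argument in place) by a single
-- iterative left-to-right pass keeping all partial strings in an accumulator; the
-- equivalence proved here is about the RETURN value only (A mutates `sequence`, B does not).

-- ===== PORT A =====
def generate_possible_sequences (sequence : List String) (index : Int) (sequences : List String) : List String :=
  -- if index == len(sequence): return [''.join(sequence)]
  if index = (sequence.length : Int) then [PySem.Str.join "" sequence]
  else
    -- sequences = []  (rebound; the incoming argument is never read)
    match _h : PySem.List.pyGet? sequence index with
    | none => []   -- sequence[index] raises IndexError here; excluded by Pre_
    | some s =>
      if s = "R" then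
        -- sequence[index] = 'G'; first recursive call (sequences is [] at call time)
        let r1 := generate_possible_sequences (PySem.List.pySetD sequence index "G") (index + 1) []
        -- sequence_copy[index] = 'A'; second recursive call (sequences holds r1 at call time)
        let r2 := generate_possible_sequences (PySem.List.pySetD sequence index "A") (index + 1) r1
        r1 ++ r2
      else
        generate_possible_sequences sequence (index + 1) []
termination_by ((sequence.length : Int) - index).toNat
decreasing_by
  all_goals
    have hin : PySem.Raise.InRange sequence.length index := by
      by_contra hc
      rw [← PySem.List.pyGet?_eq_none_iff] at hc
      simp [hc] at _h
    obtain ⟨h1, h2⟩ := hin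
  · simp only [PySem.List.length_pySetD]; omega
  · simp only [PySem.List.length_pySetD]; omega
  · omega

-- ===== PORT B =====
def generate_possible_sequences_alt (sequence : List String) (index : Int) (sequences : List String) : List String :=
  -- acc = [''.join(sequence[:index])]
  let acc0 := [PySem.Str.join "" (PySem.List.slice sequence none (some index))]
  -- for ch in sequence[index:]: branch on ch == 'R'
  (PySem.List.slice sequence (some index) none).foldl
    (fun acc ch =>
      if ch = "R" then acc.flatMap (fun p => ["G", "A"].map (fun c => p ++ c))
      else acc.map (fun p => p ++ ch))
    acc0

-- ===== PRECONDITION & SPEC =====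
-- Pre_ excludes indices where A raises IndexError (index > len or index < -len) and the
-- negative in-range indices, where A's wraparound recursion re-walks the suffix and still
-- expands 'R's lying before the start position while B's slice reading keeps the prefix
-- verbatim — two equally accidental readings of an argument A's recursion only ever
-- produces as 0 or index+1.
def Pre_generate_possible_sequences (sequence : List String) (index : Int) (sequences : List String) : Prop :=
  0 ≤ index ∧ index ≤ (sequence.length : Int)
instance (sequence : List String) (index : Int) (sequences : List String) : Decidable (Pre_generate_possible_sequences sequence index sequences) := by unfold Pre_generate_possible_sequences; infer_instance

def pvWitness_generate_possible_sequences : List String × Int × List String := (["R", "G", "R"], 0, [])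

def Spec_generate_possible_sequences (sequence : List String) (index : Int) (sequences : List String) (out : List String) : Prop := out = generate_possible_sequences_alt sequence index sequences
instance (sequence : List String) (index : Int) (sequences : List String) (out : List String) : Decidable (Spec_generate_possible_sequences sequence index sequences out) := by unfold Spec_generate_possible_sequences; infer_instance

-- ===== CLAIM (what is proved, stated in full; the proofs are below) =====
def Claim_equal_generate_possible_sequences : Prop := ∀ (sequence : List String) (index : Int) (sequences : List String), Dom_generate_possible_sequences sequence index sequences → Pre_generate_possible_sequences sequence index sequences → Spec_generate_possible_sequences sequence index sequences (generate_possible_sequences sequence index sequences)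

-- ===== LEMMAS AND PROOFS =====

-- ''.join, abbreviated
def pvJ (l : List String) : String := PySem.Str.join "" l

-- one step of B's accumulator pass
def pvStep (acc : List String) (ch : String) : List String :=
  if ch = "R" then acc.flatMap (fun p => ["G", "A"].map (fun c => p ++ c))
  else acc.map (fun p => p ++ ch)

-- A, rephrased on a Nat index (bridge lemma pvA_eq below)
def pvGenN (seq : List String) (i : Nat) : List String :=
  if i = seq.length then [pvJ seq]
  else if h : i < seq.length then
    if seq[i] = "R" then
      pvGenN (seq.set i "G") (i + 1) ++ pvGenN (seq.set i "A") (i + 1)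
    else pvGenN seq (i + 1)
  else []
termination_by seq.length - i
decreasing_by all_goals first
  | (simp only [List.length_set]; omega)
  | omega

lemma pvJoin_nil_flatten (l : List (List Char)) : PySem.Chars.join [] l = l.flatten := by
  induction l with
  | nil => simp [pysem]
  | cons x xs ih =>
    cases xs with
    | nil => simp [pysem]
    | cons y ys => rw [PySem.Chars.join_cons_cons]; simp_all

lemma pvJ_append (a b : List String) : pvJ (a ++ b) = pvJ a ++ pvJ b := by
  simp [pvJ, PySem.Str.join, pvJoin_nil_flatten]

lemma pvJ_singleton (s : String) : pvJ [s] = s := by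
  simp [pvJ, PySem.Str.join]

lemma pvStep_append (a b : List String) (ch : String) :
    pvStep (a ++ b) ch = pvStep a ch ++ pvStep b ch := by
  unfold pvStep; split_ifs <;> simp [List.flatMap_append]

lemma foldl_pvStep_append (l : List String) (a b : List String) :
    l.foldl pvStep (a ++ b) = l.foldl pvStep a ++ l.foldl pvStep b := by
  induction l generalizing a b with
  | nil => rfl
  | cons x xs ih => simp only [List.foldl_cons, pvStep_append, ih]

lemma pvA_eq_fuel (n : Nat) (seq : List String) (index : Int) (seqs : List String)
    (h0 : 0 ≤ index) (h1 : index ≤ (seq.length : Int))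
    (hn : ((seq.length : Int) - index).toNat = n) :
    generate_possible_sequences seq index seqs = pvGenN seq index.toNat := by
  induction n generalizing seq index seqs with
  | zero =>
    have hix : index = (seq.length : Int) := by omega
    rw [generate_possible_sequences, pvGenN]
    simp [hix, pvJ]
  | succ n ih =>
    have hlt : index < (seq.length : Int) := by omega
    have hne : ¬ index = (seq.length : Int) := by omega
    have hltn : index.toNat < seq.length := by omega
    have hget : PySem.List.pyGet? seq index = some seq[index.toNat] := by
      rw [PySem.List.pyGet?_of_nonneg seq h0]; exact List.getElem?_eq_getElem hltn
    have hset : ∀ c : String, PySem.List.pySetD seq index c = seq.set index.toNat c :=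
      fun c => PySem.List.pySetD_of_nonneg seq c h0
    have htn : (index + 1).toNat = index.toNat + 1 := by omega
    rw [generate_possible_sequences, if_neg hne,
      pvGenN, if_neg (by omega : ¬ index.toNat = seq.length), dif_pos hltn]
    split
    · simp_all
    · rename_i s hs
      rw [hget] at hs
      injection hs with hs
      subst hs
      have e1 : ∀ q, generate_possible_sequences (seq.set index.toNat "G") (index + 1) q
          = pvGenN (seq.set index.toNat "G") (index + 1).toNat := fun q =>
        ih (seq.set index.toNat "G") (index + 1) q (by omega)
          (by simp only [List.length_set]; omega) (by simp only [List.length_set]; omega)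
      have e2 : ∀ q, generate_possible_sequences (seq.set index.toNat "A") (index + 1) q
          = pvGenN (seq.set index.toNat "A") (index + 1).toNat := fun q =>
        ih (seq.set index.toNat "A") (index + 1) q (by omega)
          (by simp only [List.length_set]; omega) (by simp only [List.length_set]; omega)
      by_cases hr : seq[index.toNat] = "R"
      · rw [if_pos hr, if_pos hr]
        simp only [hset, e1, e2, htn]
      · rw [if_neg hr, if_neg hr, ih seq (index + 1) [] (by omega) (by omega) (by omega), htn]

lemma pvGenN_eq_fold (n : Nat) (seq : List String) (i : Nat) (hle : i ≤ seq.length)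
    (hn : seq.length - i = n) :
    pvGenN seq i = (seq.drop i).foldl pvStep [pvJ (seq.take i)] := by
  induction n generalizing seq i with
  | zero =>
    have hix : i = seq.length := by omega
    rw [pvGenN]
    simp [hix, List.take_of_length_le (le_refl seq.length)]
  | succ n ih =>
    have hlt : i < seq.length := by omega
    rw [pvGenN, List.drop_eq_getElem_cons hlt, List.foldl_cons]
    simp only [if_neg (by omega : ¬ i = seq.length), dif_pos hlt]
    have htake : ∀ c : String, (seq.set i c).take (i + 1) = seq.take i ++ [c] := by
      intro c
      rw [List.take_add_one, List.take_set,
        List.set_eq_of_length_le (by rw [List.length_take]; omega),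
        List.getElem?_set_self hlt]
      rfl
    have hdrop : ∀ c : String, (seq.set i c).drop (i + 1) = seq.drop (i + 1) := by
      intro c; rw [List.drop_set, if_pos (by omega)]
    by_cases hr : seq[i] = "R"
    · rw [if_pos hr,
        ih (seq.set i "G") (i + 1) (by simp [List.length_set]; omega) (by simp [List.length_set]; omega),
        ih (seq.set i "A") (i + 1) (by simp [List.length_set]; omega) (by simp [List.length_set]; omega),
        htake, htake, hdrop, hdrop]
      have hstep : pvStep [pvJ (seq.take i)] seq[i]
          = [pvJ (seq.take i ++ ["G"])] ++ [pvJ (seq.take i ++ ["A"])] := by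
        simp [pvStep, hr, pvJ_append, pvJ_singleton]
      rw [hstep, foldl_pvStep_append]
    · rw [if_neg hr, ih seq (i + 1) (by omega) (by omega)]
      have hstep : pvStep [pvJ (seq.take i)] seq[i] = [pvJ (seq.take (i + 1))] := by
        rw [List.take_add_one, List.getElem?_eq_getElem hlt, Option.toList_some,
          pvJ_append, pvJ_singleton]
        simp [pvStep, hr]
      rw [hstep]

lemma pvB_eq (seq : List String) (index : Int) (seqs : List String) (h0 : 0 ≤ index) :
    generate_possible_sequences_alt seq index seqs
      = (seq.drop index.toNat).foldl pvStep [pvJ (seq.take index.toNat)] := by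
  unfold generate_possible_sequences_alt
  rw [PySem.List.slice_to seq h0, PySem.List.slice_from seq h0]
  rfl

-- ===== VERDICT (by name: the statement is the Claim_ definition above) =====
theorem generate_possible_sequences_spec : Claim_equal_generate_possible_sequences := by
  intro seq index seqs _hdom hpre
  obtain ⟨h0, h1⟩ := hpre
  unfold Spec_generate_possible_sequences
  rw [pvA_eq_fuel (((seq.length : Int) - index).toNat) seq index seqs h0 h1 rfl,
    pvB_eq seq index seqs h0,
    pvGenN_eq_fold (seq.length - index.toNat) seq index.toNat (by omega) rfl]
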